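-- pv_equiv track=rewrite | github.com/swkim0911/Algorithm | 프로그래머스/2/150368. 이모티콘 할인행사/이모티콘 할인행사.py | solution
-- ===== SOURCE A (Python) =====
-- def solution(users, emoticons):
--     rates = [10,20,30,40]
--     answer = []
--
--     max_plus_service = -1
--     max_users_play = 0
--     # 4 ** 7
--     for v in range(4**len(emoticons)):
--         cur = v
--         rate_arr = []
--         plus_service = 0
--         users_pay = 0
--
--         for i in range(len(emoticons)):
--             rest = cur % 4
--             rate_arr.append(rates[rest])
--             cur //= 4
--
--         for user in users:
--             user_rate, price_limit = user
--             user_pay = 0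
--             for i, rate in enumerate(rate_arr):
--                 if user_rate <= rate:
--                     user_pay += emoticons[i] * (100 - rate) // 100
--             if price_limit <= user_pay:
--                 plus_service += 1
--             else:
--                 users_pay += user_pay
--
--         if max_plus_service < plus_service:
--             max_plus_service = plus_service
--             max_users_play = users_pay
--         elif max_plus_service == plus_service and max_users_play < users_pay:
--             max_plus_service = plus_service
--             max_users_play = users_pay
--
--     return [max_plus_service, max_users_play]
-- ===== SOURCE B (Python) =====
-- def solution(users, emoticons):
--     def best(rem, pays):
--         # leaf: all discount rates chosen; score this assignment
--         if not rem:
--             plus = 0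
--             total = 0
--             for (user_rate, price_limit), pay in zip(users, pays):
--                 if price_limit <= pay:
--                     plus += 1
--                 else:
--                     total += pay
--             return (plus, total)
--         e = rem[0]
--         b = (-1, 0)
--         for rate in (10, 20, 30, 40):
--             new_pays = [pay + e * (100 - rate) // 100 if user_rate <= rate else pay
--                         for (user_rate, _), pay in zip(users, pays)]
--             c = best(rem[1:], new_pays)
--             if b < c:
--                 b = c
--         return b
--     b = best(emoticons, [0] * len(users))
--     return [b[0], b[1]]
-- ===== Notes on version B (the rewrite author's own statement) =====
-- stated objective: alternative
-- what changed: Replaces the base-4 integer enumeration (decode digits, then rescan emoticons per user per assignment) with a recursion over the emoticon list that branches on the four rates and carries each user's running pay incrementally, so prefix work is shared across assignments and no digit decoding or per-leaf enumerate pass remains.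
import Mathlib
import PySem

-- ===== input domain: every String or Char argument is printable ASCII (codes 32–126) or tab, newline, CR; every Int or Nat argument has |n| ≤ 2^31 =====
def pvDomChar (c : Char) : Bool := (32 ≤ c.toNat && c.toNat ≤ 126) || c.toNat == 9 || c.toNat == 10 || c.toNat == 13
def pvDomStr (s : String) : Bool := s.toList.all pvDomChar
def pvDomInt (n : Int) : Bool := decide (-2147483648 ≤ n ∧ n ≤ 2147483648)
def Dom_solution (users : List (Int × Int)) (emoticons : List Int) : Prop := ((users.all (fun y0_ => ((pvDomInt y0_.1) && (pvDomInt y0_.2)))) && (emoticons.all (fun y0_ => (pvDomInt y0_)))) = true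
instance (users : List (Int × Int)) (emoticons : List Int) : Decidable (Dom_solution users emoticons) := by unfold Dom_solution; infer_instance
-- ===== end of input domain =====

-- B replaces A's base-4 enumeration of rate assignments by a recursion over the
-- emoticon list carrying incremental per-user pays (objective: alternative).

-- ===== PORT A =====
-- rates[rest] is ported with pyGetD (default 0): rest = cur % 4 always lies in
-- range [0,4), so Python never raises here and the default is never used;
-- likewise emoticons[i] with i from enumerate(rate_arr), len(rate_arr) = len(emoticons).
def solution (users : List (Int × Int)) (emoticons : List Int) : List Int :=
  let rates : List Int := [10, 20, 30, 40]
  -- answer = [] is dead code in A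
  let res := (PySem.List.pyRange 0 ((4 : Int) ^ emoticons.length) 1).foldl
    (fun (best : Int × Int) v =>
      let dec := (PySem.List.pyRange 0 (emoticons.length : Int) 1).foldl
        (fun (st : Int × List Int) _ =>
          (PySem.Int.floordiv st.1 4,
           st.2 ++ [PySem.List.pyGetD rates (PySem.Int.mod st.1 4) 0]))
        (v, [])
      let rate_arr := dec.2
      let pp := users.foldl
        (fun (acc : Int × Int) user =>
          let user_pay := (PySem.List.enumerate rate_arr 0).foldl
            (fun pay ir =>
              if user.1 ≤ ir.2 then
                pay + PySem.Int.floordiv (PySem.List.pyGetD emoticons ir.1 0 * (100 - ir.2)) 100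
              else pay) 0
          if user.2 ≤ user_pay then (acc.1 + 1, acc.2) else (acc.1, acc.2 + user_pay))
        (0, 0)
      if best.1 < pp.1 then pp
      else if best.1 = pp.1 ∧ best.2 < pp.2 then pp
      else best)
    (-1, 0)
  [res.1, res.2]

-- ===== PORT B =====
-- leaf scoring: count plus-subscribers, sum the rest (zip users pays)
def altLeaf (users : List (Int × Int)) (pays : List Int) : Int × Int :=
  (users.zip pays).foldl
    (fun (st : Int × Int) up =>
      if up.1.2 ≤ up.2 then (st.1 + 1, st.2) else (st.1, st.2 + up.2)) (0, 0)

-- the new_pays list comprehension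
def altUpd (users : List (Int × Int)) (e rate : Int) (pays : List Int) : List Int :=
  (users.zip pays).map
    (fun up => if up.1.1 ≤ rate then up.2 + PySem.Int.floordiv (e * (100 - rate)) 100 else up.2)

-- the recursive helper best(rem, pays)
def altBest (users : List (Int × Int)) : List Int → List Int → Int × Int
  | [], pays => altLeaf users pays
  | e :: rest, pays =>
      ([10, 20, 30, 40] : List Int).foldl
        (fun b rate =>
          let c := altBest users rest (altUpd users e rate pays)
          if b.1 < c.1 ∨ (b.1 = c.1 ∧ b.2 < c.2) then c else b)
        (-1, 0)

def solution_alt (users : List (Int × Int)) (emoticons : List Int) : List Int :=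
  let b := altBest users emoticons (List.replicate users.length 0)
  [b.1, b.2]

-- ===== PRECONDITION & SPEC =====
def Spec_solution (users : List (Int × Int)) (emoticons : List Int) (out : List Int) : Prop := out = solution_alt users emoticons
instance (users : List (Int × Int)) (emoticons : List Int) (out : List Int) : Decidable (Spec_solution users emoticons out) := by unfold Spec_solution; infer_instance

-- ===== CLAIM (what is proved, stated in full; the proofs are below) =====
def Claim_equal_solution : Prop := ∀ (users : List (Int × Int)) (emoticons : List Int), Dom_solution users emoticons → Spec_solution users emoticons (solution users emoticons)

-- ===== LEMMAS AND PROOFS =====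

/-- the strict-improvement update both programs apply: lexicographic max,
keeping the left argument on ties -/
def lmax (a b : Int × Int) : Int × Int :=
  if a.1 < b.1 ∨ (a.1 = b.1 ∧ a.2 < b.2) then b else a

theorem lmax_assoc (a b c : Int × Int) : lmax (lmax a b) c = lmax a (lmax b c) := by
  rcases a with ⟨a1, a2⟩; rcases b with ⟨b1, b2⟩; rcases c with ⟨c1, c2⟩
  simp only [lmax]
  split_ifs <;> first | rfl | (simp only [Prod.mk.injEq]; omega)

theorem lmax_rightcomm (a b c : Int × Int) : lmax (lmax a b) c = lmax (lmax a c) b := by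
  rcases a with ⟨a1, a2⟩; rcases b with ⟨b1, b2⟩; rcases c with ⟨c1, c2⟩
  simp only [lmax]
  split_ifs <;> first | rfl | (simp only [Prod.mk.injEq]; omega)

/-- `(-1, 0) ≤` in the lexicographic order -/
def Okp (b : Int × Int) : Prop := -1 < b.1 ∨ (b.1 = -1 ∧ 0 ≤ b.2)

theorem Okp_bot : Okp (-1, 0) := by simp [Okp]

theorem lmax_bot {b : Int × Int} (h : Okp b) : lmax b (-1, 0) = b := by
  rcases b with ⟨b1, b2⟩
  simp only [lmax, Okp] at h ⊢
  split_ifs <;> first | rfl | (simp only [Prod.mk.injEq]; omega)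

theorem lmax_bot_left {b : Int × Int} (h : 0 ≤ b.1) : lmax (-1, 0) b = b := by
  rcases b with ⟨b1, b2⟩
  simp only [lmax] at *
  split_ifs <;> first | rfl | (simp only [Prod.mk.injEq]; omega)

theorem Okp_lmax {a : Int × Int} (h : Okp a) (b : Int × Int) : Okp (lmax a b) := by
  rcases a with ⟨a1, a2⟩; rcases b with ⟨b1, b2⟩
  simp only [lmax, Okp] at *
  split_ifs <;> omega

theorem ite_lmax (b p : Int × Int) :
    (if b.1 < p.1 then p else if b.1 = p.1 ∧ b.2 < p.2 then p else b) = lmax b p := by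
  simp only [lmax]
  split_ifs <;> first | rfl | tauto

theorem foldl_lmax_perm {l1 l2 : List (Int × Int)} (h : l1.Perm l2) :
    ∀ b, l1.foldl lmax b = l2.foldl lmax b := by
  induction h with
  | nil => intro b; rfl
  | cons x _ ih => intro b; simp only [List.foldl_cons]; exact ih _
  | swap x y l => intro b; simp only [List.foldl_cons]; rw [lmax_rightcomm]
  | trans _ _ ih1 ih2 => intro b; rw [ih1, ih2]

theorem foldl_lmax_init (l : List (Int × Int)) :
    ∀ b e, l.foldl lmax (lmax b e) = lmax b (l.foldl lmax e) := by
  induction l with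
  | nil => intro b e; rfl
  | cons a l ih =>
    intro b e
    simp only [List.foldl_cons]
    rw [lmax_assoc, ih]

/-- rate assignments in A's order: digit 0 (emoticon 0) varies fastest -/
def asgA : Nat → List (List Int)
  | 0 => [[]]
  | n + 1 => (asgA n).flatMap (fun t => ([10, 20, 30, 40] : List Int).map (fun r => r :: t))

/-- rate assignments in B's order: the last emoticon varies fastest -/
def asgB : Nat → List (List Int)
  | 0 => [[]]
  | n + 1 => ([10, 20, 30, 40] : List Int).flatMap (fun r => (asgB n).map (fun t => r :: t))

theorem map_cons_flatMap_perm {β γ : Type} (h : β → γ) (g : β → List γ) (l : List β) :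
    (l.map h ++ l.flatMap g).Perm (l.flatMap fun b => h b :: g b) := by
  induction l with
  | nil => simp
  | cons b l ih =>
    simp only [List.map_cons, List.flatMap_cons, List.cons_append]
    refine List.Perm.cons _ ?_
    have h1 : (l.map h ++ (g b ++ l.flatMap g)).Perm (g b ++ (l.map h ++ l.flatMap g)) := by
      rw [← List.append_assoc, ← List.append_assoc]
      exact (List.perm_append_comm).append_right _
    exact h1.trans (ih.append_left (g b))

theorem flatMap_map_perm {α β γ : Type} (f : α → β → γ) (l1 : List α) (l2 : List β) :
    (l1.flatMap fun a => l2.map (f a)).Perm (l2.flatMap fun b => l1.map (fun a => f a b)) := by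
  induction l1 with
  | nil => simp
  | cons a l1 ih =>
    simp only [List.flatMap_cons, List.map_cons]
    exact (ih.append_left _).trans
      (map_cons_flatMap_perm (fun b => f a b) (fun b => l1.map (fun a => f a b)) l2)

theorem flatMap_perm_congr {α β : Type} {f g : α → List β} (l : List α)
    (h : ∀ a ∈ l, (f a).Perm (g a)) : (l.flatMap f).Perm (l.flatMap g) := by
  induction l with
  | nil => simp
  | cons a l ih =>
    simp only [List.flatMap_cons]
    exact (h a (by simp)).append (ih fun a ha => h a (by simp [ha]))

theorem flatMap_congr' {α β : Type} {f g : α → List β} (l : List α)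
    (h : ∀ a ∈ l, f a = g a) : l.flatMap f = l.flatMap g := by
  induction l with
  | nil => rfl
  | cons a l ih =>
    simp only [List.flatMap_cons]
    rw [h a (by simp), ih fun a ha => h a (by simp [ha])]

theorem flatMap_of_map {α β γ : Type} (f : α → β) (g : β → List γ) (l : List α) :
    (l.map f).flatMap g = l.flatMap (fun a => g (f a)) := by
  induction l <;> simp_all

theorem asg_perm (n : Nat) : (asgA n).Perm (asgB n) := by
  induction n with
  | zero => exact List.Perm.refl _
  | succ n ih =>
    show ((asgA n).flatMap fun t => ([10,20,30,40] : List Int).map (fun r => r :: t)).Perm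
      (([10,20,30,40] : List Int).flatMap fun r => (asgB n).map (fun t => r :: t))
    refine (flatMap_map_perm (fun t r => r :: t) (asgA n) ([10,20,30,40] : List Int)).trans ?_
    exact flatMap_perm_congr _ (fun r _ => ih.map _)

theorem length_mem_asgA : ∀ (n : Nat) {ra : List Int}, ra ∈ asgA n → ra.length = n := by
  intro n
  induction n with
  | zero => intro ra h; simp [asgA] at h; simp [h]
  | succ n ih =>
    intro ra h
    simp only [asgA, List.mem_flatMap, List.mem_map] at h
    obtain ⟨t, ht, r, _, rfl⟩ := h
    simp [ih ht]

theorem foldl_flatMap' {α β γ : Type} (f : γ → β → γ) (g : α → List β) (l : List α) :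
    ∀ (init : γ), (l.flatMap g).foldl f init = l.foldl (fun acc a => (g a).foldl f acc) init := by
  induction l with
  | nil => intro init; rfl
  | cons a l ih =>
    intro init
    simp only [List.flatMap_cons, List.foldl_append, List.foldl_cons, ih]

theorem foldl_ok_congr (inner : Int → List (Int × Int)) :
    ∀ (rs : List Int) (b : Int × Int), Okp b →
      rs.foldl (fun b r => (inner r).foldl lmax b) b
        = rs.foldl (fun b r => lmax b ((inner r).foldl lmax (-1, 0))) b := by
  intro rs
  induction rs with
  | nil => intro b _; rfl
  | cons r rs ih =>
    intro b hb
    simp only [List.foldl_cons]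
    have h1 : (inner r).foldl lmax b = lmax b ((inner r).foldl lmax (-1, 0)) := by
      have h2 := foldl_lmax_init (inner r) b (-1, 0)
      rw [lmax_bot hb] at h2
      exact h2
    rw [h1]
    exact ih _ (Okp_lmax hb _)

-- ===== A-side characterisation =====

/-- base-4 digits of `v`, mapped through the rates table, as A's inner loop builds them -/
def digits : Nat → Int → List Int
  | 0, _ => []
  | n + 1, v =>
    PySem.List.pyGetD ([10, 20, 30, 40] : List Int) (PySem.Int.mod v 4) 0
      :: digits n (PySem.Int.floordiv v 4)

/-- the (plus_service, users_pay) pair A computes for one decoded rate array -/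
def evalRA (users : List (Int × Int)) (emos : List Int) (ra : List Int) : Int × Int :=
  users.foldl
    (fun (acc : Int × Int) user =>
      let user_pay := (PySem.List.enumerate ra 0).foldl
        (fun pay ir =>
          if user.1 ≤ ir.2 then
            pay + PySem.Int.floordiv (PySem.List.pyGetD emos ir.1 0 * (100 - ir.2)) 100
          else pay) 0
      if user.2 ≤ user_pay then (acc.1 + 1, acc.2) else (acc.1, acc.2 + user_pay))
    (0, 0)

theorem decode_snd {α : Type} (l : List α) : ∀ (v : Int) (arr : List Int),
    ((l.foldl (fun (st : Int × List Int) _ =>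
        (PySem.Int.floordiv st.1 4,
         st.2 ++ [PySem.List.pyGetD ([10, 20, 30, 40] : List Int) (PySem.Int.mod st.1 4) 0]))
      (v, arr)).2)
    = arr ++ digits l.length v := by
  induction l with
  | nil => intro v arr; simp [digits]
  | cons x l ih =>
    intro v arr
    simp only [List.foldl_cons, List.length_cons]
    rw [ih]
    simp [digits]

theorem range_mul_eq (k : Nat) : ∀ (m : Nat),
    List.range (m * k) = (List.range m).flatMap (fun q => (List.range k).map (fun r => q * k + r)) := by
  intro m
  induction m with
  | zero => simp
  | succ m ih =>
    rw [Nat.succ_mul, List.range_add, List.range_succ]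
    simp only [List.flatMap_append, List.flatMap_cons, List.flatMap_nil, List.append_nil, ih]

theorem dig_step (n q r : Nat) (hr : r < 4) :
    digits (n + 1) ((q * 4 + r : Nat) : Int)
      = PySem.List.pyGetD ([10, 20, 30, 40] : List Int) ((r : Nat) : Int) 0
          :: digits n ((q : Nat) : Int) := by
  have h4 : (4 : Int) = ((4 : Nat) : Int) := by norm_num
  simp only [digits]
  rw [h4, PySem.Int.mod_natCast, PySem.Int.floordiv_natCast]
  have h1 : (q * 4 + r) % 4 = r := by omega
  have h2 : (q * 4 + r) / 4 = q := by omega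
  rw [h1, h2]

theorem map_digits_rangeN : ∀ (n : Nat),
    (List.range (4 ^ n)).map (fun k => digits n ((k : Nat) : Int)) = asgA n := by
  intro n
  induction n with
  | zero => rfl
  | succ n ih =>
    rw [pow_succ, range_mul_eq 4 (4 ^ n), List.map_flatMap]
    have inner : ∀ q ∈ List.range (4 ^ n),
        ((List.range 4).map (fun r => q * 4 + r)).map (fun k => digits (n + 1) ((k : Nat) : Int))
          = ([10, 20, 30, 40] : List Int).map (fun rr => rr :: digits n ((q : Nat) : Int)) := by
      intro q _
      rw [List.map_map]
      rw [show List.range 4 = [0, 1, 2, 3] from rfl]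
      simp only [List.map_cons, List.map_nil, Function.comp]
      rw [dig_step n q 0 (by omega), dig_step n q 1 (by omega),
          dig_step n q 2 (by omega), dig_step n q 3 (by omega)]
      norm_num [PySem.List.pyGetD_natCast]
      refine ⟨?_, ?_, ?_⟩ <;> decide
    rw [flatMap_congr' _ inner]
    rw [show asgA (n + 1)
        = (asgA n).flatMap (fun t => ([10, 20, 30, 40] : List Int).map (fun r => r :: t)) from rfl]
    rw [← ih, flatMap_of_map]

theorem pyRange_digits (n : Nat) :
    (PySem.List.pyRange 0 ((4 : Int) ^ n) 1).map (digits n) = asgA n := by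
  rw [PySem.List.pyRange_one]
  have hX : (((4 : Int) ^ n) - 0).toNat = 4 ^ n := by
    rw [sub_zero, show ((4 : Int) ^ n) = ((4 ^ n : Nat) : Int) by push_cast; ring]
    exact Int.toNat_natCast _
  rw [hX, List.map_map, ← map_digits_rangeN n]
  refine List.map_congr_left ?_
  intro k _
  simp

theorem solA (users : List (Int × Int)) (emos : List Int) :
    solution users emos =
      [(((asgA emos.length).map (evalRA users emos)).foldl lmax (-1, 0)).1,
       (((asgA emos.length).map (evalRA users emos)).foldl lmax (-1, 0)).2] := by
  simp only [solution]
  refine congrArg (fun p : Int × Int => [p.1, p.2]) ?_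
  refine Eq.trans (PySem.List.foldl_congr_mem _ _
    (fun (best : Int × Int) v => lmax best (evalRA users emos (digits emos.length v))) _ ?_) ?_
  · intro acc x _
    simp only []
    rw [decode_snd]
    simp only [PySem.List.length_pyRange_one, sub_zero, Int.toNat_natCast, List.nil_append]
    exact ite_lmax acc _
  · rw [← List.foldl_map (f := fun v => evalRA users emos (digits emos.length v)) (g := lmax)]
    congr 1
    rw [show (fun v => evalRA users emos (digits emos.length v))
        = (evalRA users emos) ∘ (digits emos.length) from rfl, ← List.map_map]
    rw [pyRange_digits]

-- ===== B-side characterisation =====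

/-- the pays vector after processing a prefix of emoticons with the chosen rates -/
def payAll (users : List (Int × Int)) (pays : List Int) (rem ra : List Int) : List Int :=
  (rem.zip ra).foldl (fun p er => altUpd users er.1 er.2 p) pays

theorem payAll_cons (users : List (Int × Int)) (pays : List Int) (e r : Int) (rem ra : List Int) :
    payAll users pays (e :: rem) (r :: ra) = payAll users (altUpd users e r pays) rem ra := rfl

theorem zip_map_self {α β : Type} (f : α → β) (l : List α) :
    l.zip (l.map f) = l.map (fun a => (a, f a)) := by
  induction l <;> simp_all

theorem foldl_leaf_nonneg : ∀ (l : List ((Int × Int) × Int)) (acc : Int × Int), 0 ≤ acc.1 →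
    0 ≤ (l.foldl (fun (st : Int × Int) up =>
      if up.1.2 ≤ up.2 then (st.1 + 1, st.2) else (st.1, st.2 + up.2)) acc).1 := by
  intro l
  induction l with
  | nil => intro acc h; exact h
  | cons a l ih =>
    intro acc h
    simp only [List.foldl_cons]
    apply ih
    split_ifs <;> simp <;> omega

theorem altLeaf_fst_nonneg (users : List (Int × Int)) (pays : List Int) :
    0 ≤ (altLeaf users pays).1 :=
  foldl_leaf_nonneg _ _ (le_refl 0)

theorem altBest_eq (users : List (Int × Int)) : ∀ (rem pays : List Int),
    altBest users rem pays
      = ((asgB rem.length).map (fun ra => altLeaf users (payAll users pays rem ra))).foldl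
          lmax (-1, 0) := by
  intro rem
  induction rem with
  | nil =>
    intro pays
    simp only [altBest, asgB, List.length_nil, List.map_cons, List.map_nil,
      List.foldl_cons, List.foldl_nil]
    exact (lmax_bot_left (altLeaf_fst_nonneg users _)).symm
  | cons e rest ih =>
    intro pays
    simp only [altBest, List.length_cons]
    have hbody : (fun (b : Int × Int) (rate : Int) =>
        let c := altBest users rest (altUpd users e rate pays)
        if b.1 < c.1 ∨ (b.1 = c.1 ∧ b.2 < c.2) then c else b)
        = fun b rate => lmax b (altBest users rest (altUpd users e rate pays)) := rfl
    rw [hbody]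
    simp only [ih]
    rw [show asgB (rest.length + 1)
        = ([10, 20, 30, 40] : List Int).flatMap (fun r => (asgB rest.length).map (fun t => r :: t))
        from rfl]
    rw [List.map_flatMap, foldl_flatMap']
    simp only [List.map_map, Function.comp_def, payAll_cons]
    exact (foldl_ok_congr
      (fun r => (asgB rest.length).map
        (fun t => altLeaf users (payAll users (altUpd users e r pays) rest t)))
      ([10, 20, 30, 40]) (-1, 0) Okp_bot).symm

-- ===== bridging the two per-assignment evaluations =====

/-- one user's total pay for a rate assignment -/
def perUser (ur : Int) : List Int → List Int → Int
  | e :: es, r :: rs =>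
    (if ur ≤ r then PySem.Int.floordiv (e * (100 - r)) 100 else 0) + perUser ur es rs
  | _, _ => 0

theorem payAll_map (users : List (Int × Int)) : ∀ (emos ra : List Int) (f : Int × Int → Int),
    payAll users (users.map f) emos ra = users.map (fun u => f u + perUser u.1 emos ra) := by
  intro emos
  induction emos with
  | nil => intro ra f; simp [payAll, perUser]
  | cons e es ih =>
    intro ra f
    cases ra with
    | nil => simp [payAll, perUser]
    | cons r rs =>
      rw [payAll_cons]
      have hupd : altUpd users e r (users.map f)
          = users.map (fun u => f u + (if u.1 ≤ r then PySem.Int.floordiv (e * (100 - r)) 100 else 0)) := by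
        unfold altUpd
        rw [zip_map_self, List.map_map]
        refine List.map_congr_left ?_
        intro a _
        simp only [Function.comp_def]
        split_ifs <;> simp
      rw [hupd, ih]
      refine List.map_congr_left ?_
      intro u _
      simp only [perUser]
      ring

theorem payAll_zero (users : List (Int × Int)) (emos ra : List Int) :
    payAll users (List.replicate users.length 0) emos ra
      = users.map (fun u => perUser u.1 emos ra) := by
  rw [← List.map_const', payAll_map]
  simp

theorem enum_fold (ur : Int) (emos : List Int) : ∀ (ra : List Int) (s : Nat) (acc : Int),
    ra.length = (emos.drop s).length →
    (PySem.List.enumerate ra ((s : Nat) : Int)).foldl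
      (fun pay ir =>
        if ur ≤ ir.2 then
          pay + PySem.Int.floordiv (PySem.List.pyGetD emos ir.1 0 * (100 - ir.2)) 100
        else pay) acc
    = acc + perUser ur (emos.drop s) ra := by
  intro ra
  induction ra with
  | nil =>
    intro s acc h
    have hd : emos.drop s = [] := List.length_eq_zero_iff.mp (by simpa using h.symm)
    rw [hd]
    simp [PySem.List.enumerate_nil, perUser]
  | cons r ra ih =>
    intro s acc h
    have hs : s < emos.length := by
      rw [List.length_drop] at h
      simp only [List.length_cons] at h
      omega
    rw [PySem.List.enumerate_cons]
    simp only [List.foldl_cons]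
    have hget : PySem.List.pyGetD emos ((s : Nat) : Int) 0 = emos[s] := by
      rw [PySem.List.pyGetD_natCast]
      exact List.getD_eq_getElem emos 0 hs
    have hlen2 : ra.length = (emos.drop (s + 1)).length := by
      rw [List.length_drop] at h ⊢
      simp only [List.length_cons] at h
      omega
    have hcast : ((s : Nat) : Int) + 1 = (((s + 1 : Nat)) : Int) := by push_cast; ring
    rw [hget, hcast, ih (s + 1) _ hlen2]
    rw [List.drop_eq_getElem_cons hs]
    simp only [perUser]
    split_ifs <;> ring

theorem evalRA_eq (users : List (Int × Int)) (emos ra : List Int) (h : ra.length = emos.length) :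
    evalRA users emos ra = altLeaf users (users.map (fun u => perUser u.1 emos ra)) := by
  unfold evalRA altLeaf
  rw [zip_map_self, List.foldl_map]
  refine PySem.List.foldl_congr_mem users _ _ (0, 0) ?_
  intro acc u _
  have hp : (PySem.List.enumerate ra 0).foldl
      (fun pay ir =>
        if u.1 ≤ ir.2 then
          pay + PySem.Int.floordiv (PySem.List.pyGetD emos ir.1 0 * (100 - ir.2)) 100
        else pay) 0 = perUser u.1 emos ra := by
    have h0 := enum_fold u.1 emos ra 0 0 (by simpa using h)
    simpa using h0
  dsimp only
  rw [hp]

-- ===== assembly =====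

theorem solution_eq (users : List (Int × Int)) (emos : List Int) :
    solution users emos = solution_alt users emos := by
  rw [solA]
  rw [show solution_alt users emos
      = [(altBest users emos (List.replicate users.length 0)).1,
         (altBest users emos (List.replicate users.length 0)).2] from rfl]
  rw [altBest_eq]
  simp only [payAll_zero]
  have hmap : (asgA emos.length).map (evalRA users emos)
      = (asgA emos.length).map (fun ra => altLeaf users (users.map (fun u => perUser u.1 emos ra))) :=
    List.map_congr_left (fun ra hra => evalRA_eq users emos ra (length_mem_asgA _ hra))
  rw [hmap]
  have hperm := (asg_perm emos.length).map
    (fun ra => altLeaf users (users.map (fun u => perUser u.1 emos ra)))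
  rw [foldl_lmax_perm hperm]

-- ===== VERDICT (by name: the statement is the Claim_ definition above) =====
theorem solution_spec : Claim_equal_solution := by
  intro users emoticons _
  show solution users emoticons = solution_alt users emoticons
  exact solution_eq users emoticons
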